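-- pv_equiv track=rewrite | github.com/Nex-Z/ShareusBot | plugins/group_admin/handlers.py | _find_ban_word
-- ===== SOURCE A (Python) =====
-- def _find_ban_word(text: str, words: list[str]) -> str | None:
--     content = (text or "").strip()
--     if not content:
--         return None
--     lowered = content.lower()
--     for word in words:
--         target = word.strip()
--         if not target:
--             continue
--         if target.lower() in lowered:
--             return target
--     return None
-- ===== SOURCE B (Python) =====
-- def _find_ban_word(text: str, words: list[str]) -> str | None:
--     lowered = (text or "").strip().lower()
--     if not lowered:
--         return None
--     n = len(lowered)
--     lengths = {len(w.strip()) for w in words if w.strip()}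
--     subs = {lowered[i:i + L] for L in lengths for i in range(n - L + 1)}
--     for word in words:
--         target = word.strip()
--         if target and target.lower() in subs:
--             return target
--     return None
-- ===== Notes on version B (the rewrite author's own statement) =====
-- stated objective: alternative
-- what changed: B builds a hash set of all substrings of the lowered text at the distinct stripped-word lengths once, then answers each word by a single set lookup instead of A's per-word linear scan of the text.
import Mathlib
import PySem

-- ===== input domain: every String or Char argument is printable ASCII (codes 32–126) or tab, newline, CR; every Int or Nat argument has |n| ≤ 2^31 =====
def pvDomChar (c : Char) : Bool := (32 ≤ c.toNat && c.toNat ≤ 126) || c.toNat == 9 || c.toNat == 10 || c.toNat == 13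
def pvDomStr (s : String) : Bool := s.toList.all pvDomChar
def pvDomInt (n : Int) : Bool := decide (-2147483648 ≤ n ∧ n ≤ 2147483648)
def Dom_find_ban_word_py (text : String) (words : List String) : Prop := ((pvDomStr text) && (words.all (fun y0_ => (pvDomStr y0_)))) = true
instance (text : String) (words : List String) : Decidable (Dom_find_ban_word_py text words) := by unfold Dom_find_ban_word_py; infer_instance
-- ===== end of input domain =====

-- B replaces A's per-word substring scan of the text by a hash set of all substrings of the
-- lowered text at the distinct stripped-word lengths, looked up once per word (objective: alternative).

-- ===== PORT A =====
-- the 'for word in words' loop of A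
def pvScanA (lowered : List Char) : List String → Option String
  | [] => none
  | w :: ws =>
    let target := PySem.Str.strip w
    if target = "" then pvScanA lowered ws
    else if PySem.Chars.isIn (PySem.Chars.lower target.toList) lowered then some target
    else pvScanA lowered ws

def find_ban_word_py (text : String) (words : List String) : Option String :=
  let content := PySem.Chars.strip (if text = "" then "" else text).toList
  if content = [] then none
  else pvScanA (PySem.Chars.lower content) words

-- ===== PORT B =====
-- {lowered[i:i+L] for i in range(n - L + 1)}
def pvSubsOfLen (lc : List Char) (L : Int) : List (List Char) :=
  (PySem.List.pyRange 0 ((lc.length : Int) - L + 1) 1).map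
    (fun i => PySem.List.slice lc (some i) (some (i + L)))

-- the 'for word in words' loop of B: one set lookup per word
def pvScanB (subs : PySem.Set (List Char)) : List String → Option String
  | [] => none
  | w :: ws =>
    let target := PySem.Str.strip w
    if target = "" then pvScanB subs ws
    else if PySem.Set.contains subs (PySem.Chars.lower target.toList) then some target
    else pvScanB subs ws

def find_ban_word_py_alt (text : String) (words : List String) : Option String :=
  let lowered := PySem.Chars.lower (PySem.Chars.strip (if text = "" then "" else text).toList)
  if lowered = [] then none
  else
    let lengths : PySem.Set Int := PySem.Set.ofList
      ((words.filter (fun w => PySem.Str.strip w != "")).map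
        (fun w => ((PySem.Str.strip w).toList.length : Int)))
    let subs : PySem.Set (List Char) := PySem.Set.ofList
      (lengths.flatMap (fun L => pvSubsOfLen lowered L))
    pvScanB subs words

-- ===== PRECONDITION & SPEC =====
def Spec_find_ban_word_py (text : String) (words : List String) (out : Option String) : Prop := out = find_ban_word_py_alt text words
instance (text : String) (words : List String) (out : Option String) : Decidable (Spec_find_ban_word_py text words out) := by unfold Spec_find_ban_word_py; infer_instance

-- ===== CLAIM (what is proved, stated in full; the proofs are below) =====
def Claim_equal_find_ban_word_py : Prop := ∀ (text : String) (words : List String), Dom_find_ban_word_py text words → Spec_find_ban_word_py text words (find_ban_word_py text words)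

-- ===== LEMMAS AND PROOFS =====

theorem pv_mem_subsOfLen_of_prefix (lc sub : List Char) (j : Nat) (hsub : sub ≠ [])
    (hp : sub <+: lc.drop j) : sub ∈ pvSubsOfLen lc (sub.length : Int) := by
  have hlen := hp.length_le
  have hdrop : (lc.drop j).length = lc.length - j := List.length_drop ..
  have hne : 0 < sub.length := List.length_pos_iff.mpr hsub
  have hjn : j + sub.length ≤ lc.length := by omega
  refine List.mem_map.mpr ⟨(j : Int), ?_, ?_⟩
  · exact PySem.List.mem_pyRange_one.mpr ⟨by positivity, by omega⟩
  · rw [show ((j : Int) + (sub.length : Int)) = ((j : Nat) : Int) + ((sub.length : Nat) : Int) by ring]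
    rw [PySem.List.slice_natCast_add]
    have := List.prefix_iff_eq_take.mp hp
    conv_rhs => rw [this]

theorem pv_infix_of_mem_subsOfLen (lc : List Char) (m : Nat) (x : List Char)
    (hx : x ∈ pvSubsOfLen lc (m : Int)) : x <:+: lc := by
  obtain ⟨i, hi, hxeq⟩ := List.mem_map.mp hx
  have h0 : 0 ≤ i := (PySem.List.mem_pyRange_one.mp hi).1
  have : i = ((i.toNat : Nat) : Int) := by omega
  rw [this] at hxeq
  rw [PySem.List.slice_natCast_add] at hxeq
  subst hxeq
  exact ((List.take_prefix _ _).isInfix).trans ((List.drop_suffix _ _).isInfix)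

theorem pv_contains_subs_iff (lc : List Char) (lens : List Int)
    (hnat : ∀ L ∈ lens, ∃ m : Nat, L = (m : Int))
    (x : List Char) (hx : x ≠ []) (hmem : ((x.length : Int)) ∈ lens) :
    PySem.Set.contains (PySem.Set.ofList (lens.flatMap fun L => pvSubsOfLen lc L)) x
      = PySem.Chars.isIn x lc := by
  by_cases h : PySem.Chars.isIn x lc = true
  · rw [h]
    simp only [PySem.Set.contains, List.contains_eq_mem, decide_eq_true_eq]
    rw [PySem.Set.mem_ofList, List.mem_flatMap]
    obtain ⟨j, hj⟩ := (PySem.Chars.exists_prefix_drop_iff_isIn x lc).mpr h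
    exact ⟨(x.length : Int), hmem, pv_mem_subsOfLen_of_prefix lc x j hx hj⟩
  · rw [eq_comm, Bool.eq_iff_iff]
    simp only [PySem.Set.contains, List.contains_eq_mem, decide_eq_true_eq]
    rw [PySem.Set.mem_ofList, List.mem_flatMap]
    constructor
    · intro hxl; exact absurd hxl (by simp [h])
    · rintro ⟨L, hL, hxL⟩
      obtain ⟨m, rfl⟩ := hnat L hL
      exact absurd ((PySem.Chars.isIn_iff_infix x lc).mpr (pv_infix_of_mem_subsOfLen lc m x hxL)) h

theorem pv_scan_eq (lc : List Char) (lens : List Int)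
    (hnat : ∀ L ∈ lens, ∃ m : Nat, L = (m : Int)) (ws : List String)
    (hlen : ∀ w ∈ ws, PySem.Str.strip w ≠ "" → (((PySem.Str.strip w).toList.length : Int)) ∈ lens) :
    pvScanB (PySem.Set.ofList (lens.flatMap fun L => pvSubsOfLen lc L)) ws = pvScanA lc ws := by
  induction ws with
  | nil => rfl
  | cons w ws ih =>
    have ihtail := ih (fun v hv => hlen v (List.mem_cons_of_mem w hv))
    by_cases hw : PySem.Str.strip w = ""
    · simp [pvScanA, pvScanB, hw, ihtail]
    · have hx : PySem.Chars.lower (PySem.Str.strip w).toList ≠ [] := by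
        intro hnil
        have : (PySem.Str.strip w).toList = [] := by
          have := congrArg List.length hnil
          simpa [PySem.Chars.lower] using List.eq_nil_of_length_eq_zero this
        exact hw (String.toList_eq_nil_iff.mp this)
      have hmem : (((PySem.Chars.lower (PySem.Str.strip w).toList).length : Int)) ∈ lens := by
        have : (PySem.Chars.lower (PySem.Str.strip w).toList).length
            = (PySem.Str.strip w).toList.length := by simp [PySem.Chars.lower]
        rw [this]; exact hlen w (List.mem_cons_self ..) hw
      simp only [pvScanA, pvScanB, if_neg hw]
      rw [pv_contains_subs_iff lc lens hnat _ hx hmem, ihtail]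

theorem find_ban_word_py_spec : Claim_equal_find_ban_word_py := by
  unfold Claim_equal_find_ban_word_py
  intro text words _
  unfold Spec_find_ban_word_py find_ban_word_py find_ban_word_py_alt
  set content := PySem.Chars.strip (if text = "" then "" else text).toList with hcontent
  have hlower : PySem.Chars.lower content = [] ↔ content = [] := by
    simp [PySem.Chars.lower]
  by_cases hc : content = []
  · simp [hc, PySem.Chars.lower]
  · rw [if_neg hc, if_neg (fun h => hc (hlower.mp h))]
    refine (pv_scan_eq (PySem.Chars.lower content) _ ?_ words ?_).symm
    · intro L hL
      rw [PySem.Set.mem_ofList] at hL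
      obtain ⟨w, _, rfl⟩ := List.mem_map.mp hL
      exact ⟨_, rfl⟩
    · intro w hw hstrip
      rw [PySem.Set.mem_ofList]
      refine List.mem_map.mpr ⟨w, List.mem_filter.mpr ⟨hw, ?_⟩, rfl⟩
      simp [hstrip]
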